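-- pv_equiv track=rewrite | github.com/maxi134/mws.demo | parser/utils/find_conflict.py | delete_repet
-- ===== SOURCE A (Python) =====
-- def delete_repet(list1, list2, list3):
--     common = []
--     tmp1, tmp2, tmp3 = [], [], []
--     for item in list1:
--         if item not in list2 or item not in list3:
--             tmp1.append(item)
--         else:
--             if item not in common:
--                 common.append(item)
--     for item in list2:
--         if item not in list1 or item not in list3:
--             tmp2.append(item)
--         else:
--             if item not in common:
--                 common.append(item)
--     for item in list3:
--         if item not in list1 or item not in list2:
--             tmp3.append(item)
--         else:
--             if item not in common:
--                 common.append(item)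
--     return tmp1, tmp2, tmp3, common
-- ===== SOURCE B (Python) =====
-- def delete_repet(list1, list2, list3):
--     # Presence-bitmask index: one pass tags each value with which lists contain it;
--     # outputs come from O(1) mask lookups and from the dict's insertion order.
--     mask = {}
--     lists = (list1, list2, list3)
--     for bit, lst in zip((1, 2, 4), lists):
--         for x in lst:
--             mask[x] = mask.get(x, 0) | bit
--     tmps = [[x for x in lst if mask[x] != 7] for lst in lists]
--     common = [x for x, m in mask.items() if m == 7]
--     return tmps[0], tmps[1], tmps[2], common
-- ===== Notes on version B (the rewrite author's own statement) =====
-- stated objective: faster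
-- what changed: Replaces A's three quadratic membership-scan loops with incremental dedup by a presence-bitmask dictionary built in one tagging pass over all three lists: each output list is a mask lookup filter, and the common list falls out of the dict's insertion order (keys whose mask is 7) with no dedup scan at all.
import Mathlib
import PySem

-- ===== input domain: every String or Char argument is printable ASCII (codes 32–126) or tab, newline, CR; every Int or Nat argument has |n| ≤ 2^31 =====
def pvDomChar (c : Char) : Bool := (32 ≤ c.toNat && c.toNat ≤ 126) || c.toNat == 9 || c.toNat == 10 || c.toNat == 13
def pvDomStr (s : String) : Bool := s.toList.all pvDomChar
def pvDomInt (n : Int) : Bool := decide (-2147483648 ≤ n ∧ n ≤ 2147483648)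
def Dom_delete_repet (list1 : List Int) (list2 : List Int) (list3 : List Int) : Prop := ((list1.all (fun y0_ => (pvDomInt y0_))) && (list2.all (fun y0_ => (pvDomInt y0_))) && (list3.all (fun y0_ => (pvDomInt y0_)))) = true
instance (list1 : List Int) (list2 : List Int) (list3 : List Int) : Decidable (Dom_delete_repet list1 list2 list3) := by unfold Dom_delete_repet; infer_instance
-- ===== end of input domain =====

-- B replaces A's three quadratic membership-scan loops (with incremental dedup of common) by one
-- presence-bitmask dictionary pass; outputs become mask-lookup filters and a dict-order comprehension.

-- ===== PORT A =====
-- one of A's three identical 'for item in …' loops: tests membership in la and lb,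
-- appends to tmp or (dedup) to common; state s = (tmp, common)
def pvLoopA (la lb : List Int) (xs : List Int) (s : List Int × List Int) : List Int × List Int :=
  match xs with
  | [] => s
  | x :: rest =>
    if !(la.contains x) || !(lb.contains x) then
      pvLoopA la lb rest (s.1 ++ [x], s.2)
    else
      if s.2.contains x then pvLoopA la lb rest s
      else pvLoopA la lb rest (s.1, s.2 ++ [x])

def delete_repet (list1 : List Int) (list2 : List Int) (list3 : List Int) : List Int × List Int × List Int × List Int :=
  let s1 := pvLoopA list2 list3 list1 ([], [])
  let s2 := pvLoopA list1 list3 list2 ([], s1.2)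
  let s3 := pvLoopA list1 list2 list3 ([], s2.2)
  (s1.1, s2.1, s3.1, s3.2)

-- ===== PORT B =====
-- 'for x in lst: mask[x] = mask.get(x, 0) | bit'  (one tagging inner loop of B)
def pvMaskFold (bit : Int) (xs : List Int) (d : PySem.Dict Int Int) : PySem.Dict Int Int :=
  xs.foldl (fun d x => d.insert x (PySem.Int.bor (d.getD x 0) bit)) d

def delete_repet_alt (list1 : List Int) (list2 : List Int) (list3 : List Int) : List Int × List Int × List Int × List Int :=
  let mask := pvMaskFold 4 list3 (pvMaskFold 2 list2 (pvMaskFold 1 list1 PySem.Dict.empty))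
  -- '[x for x in lst if mask[x] != 7]' — mask[x] is exact as getD x 0 here: every x of lst is a key of mask
  let tmps := [list1, list2, list3].map (fun lst => lst.filter (fun x => !(mask.getD x 0 == 7)))
  let common := (mask.items.filter (fun p => p.2 == 7)).map (fun p => p.1)
  (tmps[0]!, tmps[1]!, tmps[2]!, common)

-- ===== PRECONDITION & SPEC =====
def Spec_delete_repet (list1 : List Int) (list2 : List Int) (list3 : List Int) (out : List Int × List Int × List Int × List Int) : Prop := out = delete_repet_alt list1 list2 list3
instance (list1 : List Int) (list2 : List Int) (list3 : List Int) (out : List Int × List Int × List Int × List Int) : Decidable (Spec_delete_repet list1 list2 list3 out) := by unfold Spec_delete_repet; infer_instance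

-- ===== CLAIM =====
def Claim_equal_delete_repet : Prop := ∀ (list1 : List Int) (list2 : List Int) (list3 : List Int), Dom_delete_repet list1 list2 list3 → Spec_delete_repet list1 list2 list3 (delete_repet list1 list2 list3)

-- ===== LEMMAS AND PROOFS =====

-- A's loop, split: tmp collects the filtered-out items, common is a left fold of Set.add
theorem pvLoopA_spec (la lb xs : List Int) (tmp c : List Int) :
    pvLoopA la lb xs (tmp, c) =
      (tmp ++ xs.filter (fun x => !(la.contains x && lb.contains x)),
       (xs.filter (fun x => la.contains x && lb.contains x)).foldl PySem.Set.add c) := by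
  induction xs generalizing tmp c with
  | nil => simp [pvLoopA]
  | cons x rest ih =>
    by_cases h2 : x ∈ la
    · by_cases h3 : x ∈ lb
      · by_cases hc : x ∈ c
        · simp [pvLoopA, h2, h3, hc, ih]
        · simp [pvLoopA, h2, h3, hc, ih]
      · simp [pvLoopA, h2, h3, ih]
    · simp [pvLoopA, h2, ih]

theorem foldl_add_of_forall_mem (ys c : List Int) (h : ∀ y ∈ ys, y ∈ c) :
    ys.foldl PySem.Set.add c = c := by
  induction ys generalizing c with
  | nil => rfl
  | cons y rest ih =>
    simp only [List.foldl_cons]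
    rw [PySem.Set.add_of_mem (h y (by simp))]
    exact ih c (fun z hz => h z (by simp [hz]))

-- the bitmask value 'enc3 (in1, in2, in3)' that B's dict stores for a value with those memberships
def enc3 (t : Bool × Bool × Bool) : Int :=
  (if t.1 then 1 else 0) + (if t.2.1 then 2 else 0) + (if t.2.2 then 4 else 0)

theorem enc3_eq_seven (t : Bool × Bool × Bool) : (enc3 t == 7) = (t.1 && t.2.1 && t.2.2) := by
  rcases t with ⟨a, b, c⟩; cases a <;> cases b <;> cases c <;> decide

-- one tagging loop of B: or-ing a fixed bit into the stored mask applies 'u' to the tracked triple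
theorem getD_pvMaskFold (bit : Int) (u : Bool × Bool × Bool → Bool × Bool × Bool)
    (hu : ∀ t, PySem.Int.bor (enc3 t) bit = enc3 (u t)) (huu : ∀ t, u (u t) = u t)
    (xs : List Int) (F : Int → Bool × Bool × Bool) (d : PySem.Dict Int Int)
    (hd : ∀ z, d.getD z 0 = enc3 (F z)) (y : Int) :
    (pvMaskFold bit xs d).getD y 0 = enc3 (if y ∈ xs then u (F y) else F y) := by
  induction xs generalizing d F with
  | nil => simpa [pvMaskFold] using hd y
  | cons x rest ih =>
    simp only [pvMaskFold, List.foldl_cons] at *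
    have step : (rest.foldl (fun d x => d.insert x (PySem.Int.bor (d.getD x 0) bit))
        (d.insert x (PySem.Int.bor (d.getD x 0) bit))).getD y 0 =
        enc3 (if y ∈ rest then u ((fun z => if z = x then u (F z) else F z) y)
              else (fun z => if z = x then u (F z) else F z) y) := by
      refine ih (fun z => if z = x then u (F z) else F z)
        (d.insert x (PySem.Int.bor (d.getD x 0) bit)) (fun z => ?_)
      rw [PySem.Dict.getD_insert]
      by_cases hzx : z = x
      · simp [hzx, hd x, hu]
      · simp [hzx, hd z]
    rw [step]
    by_cases hyx : y = x
    · by_cases hyr : y ∈ rest <;> simp [hyx, huu]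
    · by_cases hyr : y ∈ rest <;> simp [hyx, hyr, List.mem_cons]

-- the finished mask: value stored for y is the membership bitmask
theorem mask_getD (l1 l2 l3 : List Int) (y : Int) :
    (pvMaskFold 4 l3 (pvMaskFold 2 l2 (pvMaskFold 1 l1 PySem.Dict.empty))).getD y 0 =
      enc3 (l1.contains y, l2.contains y, l3.contains y) := by
  have h1 : ∀ z, (pvMaskFold 1 l1 PySem.Dict.empty).getD z 0 =
      enc3 ((fun z => (l1.contains z, false, false)) z) := by
    intro z
    have := getD_pvMaskFold 1 (fun t => (true, t.2.1, t.2.2))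
      (by intro t; rcases t with ⟨a, b, c⟩; cases a <;> cases b <;> cases c <;> decide)
      (by intro t; rfl) l1 (fun _ => (false, false, false)) PySem.Dict.empty
      (fun z => by simp [PySem.Dict.getD_empty, enc3]) z
    by_cases hz : z ∈ l1 <;> simpa [List.contains_eq_mem, hz] using this
  have h2 : ∀ z, (pvMaskFold 2 l2 (pvMaskFold 1 l1 PySem.Dict.empty)).getD z 0 =
      enc3 ((fun z => (l1.contains z, l2.contains z, false)) z) := by
    intro z
    have := getD_pvMaskFold 2 (fun t => (t.1, true, t.2.2))
      (by intro t; rcases t with ⟨a, b, c⟩; cases a <;> cases b <;> cases c <;> decide)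
      (by intro t; rfl) l2 (fun z => (l1.contains z, false, false)) _ h1 z
    by_cases hz : z ∈ l2 <;> simpa [List.contains_eq_mem, hz] using this
  have := getD_pvMaskFold 4 (fun t => (t.1, t.2.1, true))
    (by intro t; rcases t with ⟨a, b, c⟩; cases a <;> cases b <;> cases c <;> decide)
    (by intro t; rfl) l3 (fun z => (l1.contains z, l2.contains z, false)) _ h2 y
  by_cases hy : y ∈ l3 <;> simpa [List.contains_eq_mem, hy] using this

theorem nodup_keys_mask (l1 l2 l3 : List Int) :
    (pvMaskFold 4 l3 (pvMaskFold 2 l2 (pvMaskFold 1 l1 PySem.Dict.empty))).keys.Nodup := by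
  unfold pvMaskFold
  refine PySem.Dict.nodup_keys_foldl_insert _ _ _ ?_
  refine PySem.Dict.nodup_keys_foldl_insert _ _ _ ?_
  refine PySem.Dict.nodup_keys_foldl_insert _ _ _ ?_
  exact PySem.Dict.nodup_keys_empty

theorem keys_mask (l1 l2 l3 : List Int) :
    (pvMaskFold 4 l3 (pvMaskFold 2 l2 (pvMaskFold 1 l1 PySem.Dict.empty))).keys =
      PySem.Set.ofList (l1 ++ l2 ++ l3) := by
  unfold pvMaskFold
  rw [PySem.Dict.keys_foldl_insert, PySem.Dict.keys_foldl_insert, PySem.Dict.keys_foldl_insert]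
  simp [PySem.Set.update, PySem.Set.ofList_eq_foldl, PySem.Dict.keys_empty, List.foldl_append]

-- filter commutes with building a Set from a list
theorem filter_ofList (q : Int → Bool) (xs : List Int) :
    (PySem.Set.ofList xs).filter q = PySem.Set.ofList (xs.filter q) := by
  suffices h : ∀ s : List Int, (xs.foldl PySem.Set.add s).filter q =
      (xs.filter q).foldl PySem.Set.add (s.filter q) by
    simpa using h []
  induction xs with
  | nil => intro s; rfl
  | cons x rest ih =>
    intro s
    simp only [List.foldl_cons, List.filter_cons]
    by_cases hq : q x = true
    · have hadd : (PySem.Set.add s x).filter q = PySem.Set.add (s.filter q) x := by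
        by_cases hm : x ∈ s
        · rw [PySem.Set.add_of_mem hm, PySem.Set.add_of_mem (List.mem_filter.mpr ⟨hm, hq⟩)]
        · rw [PySem.Set.add_of_not_mem hm,
            PySem.Set.add_of_not_mem (fun h => hm (List.mem_filter.mp h).1)]
          simp [List.filter_append, hq]
      rw [hq, ih, hadd]; simp
    · have hadd : (PySem.Set.add s x).filter q = s.filter q := by
        by_cases hm : x ∈ s
        · rw [PySem.Set.add_of_mem hm]
        · rw [PySem.Set.add_of_not_mem hm]
          simp [List.filter_append, hq]
      simp only [hq, ih, hadd]
      simp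

theorem delete_repet_eq (l1 l2 l3 : List Int) :
    delete_repet l1 l2 l3 = delete_repet_alt l1 l2 l3 := by
  unfold delete_repet delete_repet_alt
  simp only [pvLoopA_spec, List.nil_append, List.map_cons, List.map_nil,
    List.getElem!_cons_zero, List.getElem!_cons_succ]
  have hcond : ∀ x, ((pvMaskFold 4 l3 (pvMaskFold 2 l2 (pvMaskFold 1 l1 PySem.Dict.empty))).getD x 0 == 7)
      = (l1.contains x && l2.contains x && l3.contains x) := by
    intro x; rw [mask_getD l1 l2 l3 x, enc3_eq_seven]
  -- the three tmp lists agree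
  have htmp1 : l1.filter (fun x => !(l2.contains x && l3.contains x)) =
      l1.filter (fun x =>
        !((pvMaskFold 4 l3 (pvMaskFold 2 l2 (pvMaskFold 1 l1 PySem.Dict.empty))).getD x 0 == 7)) := by
    refine (List.filter_congr (fun x hx => ?_)).symm
    rw [hcond x]; simp [List.contains_eq_mem, hx]
  have htmp2 : l2.filter (fun x => !(l1.contains x && l3.contains x)) =
      l2.filter (fun x =>
        !((pvMaskFold 4 l3 (pvMaskFold 2 l2 (pvMaskFold 1 l1 PySem.Dict.empty))).getD x 0 == 7)) := by
    refine (List.filter_congr (fun x hx => ?_)).symm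
    rw [hcond x]
    by_cases h1 : x ∈ l1 <;> by_cases h3 : x ∈ l3 <;> simp [List.contains_eq_mem, hx, h1, h3]
  have htmp3 : l3.filter (fun x => !(l1.contains x && l2.contains x)) =
      l3.filter (fun x =>
        !((pvMaskFold 4 l3 (pvMaskFold 2 l2 (pvMaskFold 1 l1 PySem.Dict.empty))).getD x 0 == 7)) := by
    refine (List.filter_congr (fun x hx => ?_)).symm
    rw [hcond x]
    by_cases h1 : x ∈ l1 <;> by_cases h2 : x ∈ l2 <;> simp [List.contains_eq_mem, hx, h1, h2]
  -- common: membership in A's first-stage set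
  have hmem1 : ∀ x, x ∈ (l1.filter (fun x => l2.contains x && l3.contains x)).foldl PySem.Set.add ([] : List Int) ↔
      x ∈ l1 ∧ x ∈ l2 ∧ x ∈ l3 := by
    intro x
    rw [show (l1.filter (fun x => l2.contains x && l3.contains x)).foldl PySem.Set.add ([] : List Int) =
        PySem.Set.ofList (l1.filter (fun x => l2.contains x && l3.contains x)) from rfl,
      PySem.Set.mem_ofList]
    simp [List.mem_filter, List.contains_eq_mem]
  -- the second and third loops of A add nothing to common
  have h2none : (l2.filter (fun x => l1.contains x && l3.contains x)).foldl PySem.Set.add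
      ((l1.filter (fun x => l2.contains x && l3.contains x)).foldl PySem.Set.add []) =
      (l1.filter (fun x => l2.contains x && l3.contains x)).foldl PySem.Set.add [] := by
    refine foldl_add_of_forall_mem _ _ (fun y hy => ?_)
    rw [hmem1]
    simp only [List.mem_filter, List.contains_eq_mem, Bool.and_eq_true, decide_eq_true_eq] at hy
    exact ⟨hy.2.1, hy.1, hy.2.2⟩
  have h3none : (l3.filter (fun x => l1.contains x && l2.contains x)).foldl PySem.Set.add
      ((l1.filter (fun x => l2.contains x && l3.contains x)).foldl PySem.Set.add []) =
      (l1.filter (fun x => l2.contains x && l3.contains x)).foldl PySem.Set.add [] := by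
    refine foldl_add_of_forall_mem _ _ (fun y hy => ?_)
    rw [hmem1]
    simp only [List.mem_filter, List.contains_eq_mem, Bool.and_eq_true, decide_eq_true_eq] at hy
    exact ⟨hy.2.1, hy.2.2, hy.1⟩
  -- B's dict comprehension = A's deduped common
  have hkeyfilter :
      ((pvMaskFold 4 l3 (pvMaskFold 2 l2 (pvMaskFold 1 l1 PySem.Dict.empty))).items.filter
          (fun p => p.2 == 7)).map (fun p => p.1) =
        (PySem.Set.ofList (l1 ++ l2 ++ l3)).filter
          (fun k => l1.contains k && l2.contains k && l3.contains k) := by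
    rw [PySem.Dict.items_eq_map_keys _ (nodup_keys_mask l1 l2 l3) 0, keys_mask]
    simp only [List.filter_map, List.map_map]
    rw [List.filter_congr (fun k _ => by
      simp only [Function.comp]
      exact hcond k)]
    simp [Function.comp_def]
  have hcommon : (PySem.Set.ofList (l1 ++ l2 ++ l3)).filter
        (fun k => l1.contains k && l2.contains k && l3.contains k) =
      (l1.filter (fun x => l2.contains x && l3.contains x)).foldl PySem.Set.add [] := by
    rw [filter_ofList]
    have hq : (l1 ++ l2 ++ l3).filter (fun k => l1.contains k && l2.contains k && l3.contains k) =
        l1.filter (fun x => l2.contains x && l3.contains x) ++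
          ((l2 ++ l3).filter (fun k => l1.contains k && l2.contains k && l3.contains k)) := by
      rw [List.append_assoc, List.filter_append]
      congr 1
      refine List.filter_congr (fun x hx => ?_)
      simp [List.contains_eq_mem, hx]
    rw [hq, PySem.Set.ofList_eq_foldl, List.foldl_append]
    refine foldl_add_of_forall_mem _ _ (fun y hy => ?_)
    rw [show (l1.filter (fun x => l2.contains x && l3.contains x)).foldl PySem.Set.add ([] : List Int) =
        PySem.Set.ofList (l1.filter (fun x => l2.contains x && l3.contains x)) from rfl,
      PySem.Set.mem_ofList, List.mem_filter]
    simp only [List.mem_filter, List.contains_eq_mem, Bool.and_eq_true, decide_eq_true_eq] at hy ⊢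
    tauto
  rw [h2none, h3none]
  exact Prod.ext (by rw [htmp1]) (Prod.ext (by rw [htmp2]) (Prod.ext (by rw [htmp3])
    (by rw [hkeyfilter, hcommon])))

-- ===== VERDICT =====
theorem delete_repet_spec : Claim_equal_delete_repet := by
  intro l1 l2 l3 _
  unfold Spec_delete_repet
  exact delete_repet_eq l1 l2 l3
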